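-- pv_equiv track=rewrite | github.com/elusivenode/pyaoc | 2023/solutions/day2/p1.py | min_rgb_power
-- ===== SOURCE A (Python) =====
-- def min_rgb_power(g):
--     min_r, min_g, min_b = (0,0,0)
--     for gn in g:
--         if 'red' in g[gn] and int(g[gn]['red']) > min_r:
--             min_r = int(g[gn]['red'])
--         if 'green' in g[gn] and int(g[gn]['green']) > min_g:
--             min_g = int(g[gn]['green'])
--         if 'blue' in g[gn] and int(g[gn]['blue']) > min_b:
--             min_b = int(g[gn]['blue'])
--     return min_r * min_g * min_b
-- ===== SOURCE B (Python) =====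
-- def min_rgb_power(g):
--     draws = [(0, 'red'), (0, 'green'), (0, 'blue')]
--     for gn in g:
--         for c, v in g[gn].items():
--             if c in ('red', 'green', 'blue'):
--                 draws.append((int(v), c))
--     draws.sort(key=lambda t: t[0], reverse=True)
--     best = {}
--     for v, c in draws:
--         if c not in best:
--             best[c] = v
--     return best['red'] * best['green'] * best['blue']
-- ===== Notes on version B (the rewrite author's own statement) =====
-- stated objective: alternative
-- what changed: Replaces A's single pass with three running-max accumulators by a sort-based algorithm: flatten all draws into (count, color) pairs seeded with 0-sentinels, sort descending by count, then take the first occurrence of each color as its maximum.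
import Mathlib
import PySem

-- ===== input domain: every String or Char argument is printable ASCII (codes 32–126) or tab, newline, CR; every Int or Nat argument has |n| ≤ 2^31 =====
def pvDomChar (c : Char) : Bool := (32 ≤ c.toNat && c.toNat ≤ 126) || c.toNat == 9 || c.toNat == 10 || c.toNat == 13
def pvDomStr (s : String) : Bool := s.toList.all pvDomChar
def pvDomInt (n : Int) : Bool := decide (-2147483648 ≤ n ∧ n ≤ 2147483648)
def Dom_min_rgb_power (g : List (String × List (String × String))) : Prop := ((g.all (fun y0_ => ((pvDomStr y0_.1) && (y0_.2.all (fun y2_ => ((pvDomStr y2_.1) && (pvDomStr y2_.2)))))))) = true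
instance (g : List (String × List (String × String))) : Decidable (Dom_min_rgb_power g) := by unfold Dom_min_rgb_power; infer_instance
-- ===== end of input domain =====

-- B replaces A's single running-maxima pass (three accumulators) by a sort-based
-- algorithm: flatten all draws to (count, color) pairs with 0-sentinels, sort
-- descending by count, and take the first occurrence of each color (objective: alternative).

-- int(v) under Pre_ (which guarantees the parse succeeds); getD value never reached inside Pre_
def pvInt (v : String) : Int := (PySem.Int.ofStr? v).getD 0

-- ===== PORT A =====
-- literal transliteration of A: one fold carrying (min_r, min_g, min_b), looking each game
-- up in g by its key, branching per color in A's order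
def min_rgb_power (g : List (String × List (String × String))) : Int :=
  let st := g.foldl (fun (st : Int × Int × Int) p =>
    let cs := (List.lookup p.1 g).getD []      -- g[gn] (first match; Pre_ makes keys unique)
    let r := match List.lookup "red" cs with
             | some v => if pvInt v > st.1 then pvInt v else st.1
             | none => st.1
    let gr := match List.lookup "green" cs with
             | some v => if pvInt v > st.2.1 then pvInt v else st.2.1
             | none => st.2.1
    let b := match List.lookup "blue" cs with
             | some v => if pvInt v > st.2.2 then pvInt v else st.2.2
             | none => st.2.2
    (r, gr, b)) (0, 0, 0)
  st.1 * st.2.1 * st.2.2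

-- ===== PORT B =====
-- draws built by Source B's two nested loops (appends = foldl with ++), from the sentinel list
def pvDraws (g : List (String × List (String × String))) : List (Int × String) :=
  g.foldl (fun (acc : List (Int × String)) p =>
    let cs := (List.lookup p.1 g).getD []      -- g[gn]
    acc ++ cs.filterMap (fun q =>
      if q.1 = "red" ∨ q.1 = "green" ∨ q.1 = "blue" then some (pvInt q.2, q.1) else none))
  [((0 : Int), "red"), (0, "green"), (0, "blue")]

def min_rgb_power_alt (g : List (String × List (String × String))) : Int :=
  let ds := PySem.List.sorted (pvDraws g) (fun t => t.1) true   -- draws.sort(key=…[0], reverse=True)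
  let best := ds.foldl (fun (d : PySem.Dict String Int) t =>
    if d.contains t.2 then d else d.insert t.2 t.1) PySem.Dict.empty
  -- best['red'] etc.: the sentinels guarantee each key is present, so getD's default is never reached
  best.getD "red" 0 * best.getD "green" 0 * best.getD "blue" 0

-- ===== PRECONDITION & SPEC =====
def pvParseOK (cs : List (String × String)) : Bool :=
  ["red", "green", "blue"].all fun c =>
    match List.lookup c cs with
    | some v => (PySem.Int.ofStr? v).isSome
    | none => true

-- Pre_ excludes (a) inputs where int() raises ValueError on a present red/green/blue value, and
-- (b) association lists with duplicate keys (outer or inner), which do not represent a Python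
-- dict (a Python dict cannot hold two bindings of one key, so first-match lookup is accidental there).
def Pre_min_rgb_power (g : List (String × List (String × String))) : Prop :=
  (g.map Prod.fst).Nodup ∧ ∀ p ∈ g, (p.2.map Prod.fst).Nodup ∧ pvParseOK p.2 = true
instance (g : List (String × List (String × String))) : Decidable (Pre_min_rgb_power g) := by
  unfold Pre_min_rgb_power; infer_instance

def pvWitness_min_rgb_power : (List (String × List (String × String))) :=
  [("g1", [("red", "3"), ("blue", "2")]), ("g2", [("green", "4"), ("blue", "1")])]

def Spec_min_rgb_power (g : List (String × List (String × String))) (out : Int) : Prop := out = min_rgb_power_alt g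
instance (g : List (String × List (String × String))) (out : Int) : Decidable (Spec_min_rgb_power g out) := by unfold Spec_min_rgb_power; infer_instance

-- ===== CLAIM (what is proved, stated in full; the proofs are below) =====
def Claim_equal_min_rgb_power : Prop := ∀ (g : List (String × List (String × String))), Dom_min_rgb_power g → Pre_min_rgb_power g → Spec_min_rgb_power g (min_rgb_power g)

-- ===== LEMMAS AND PROOFS =====

-- with unique keys, looking a member's key up in the list gives back its own value
theorem pv_lookup_self {α β : Type} [BEq α] [LawfulBEq α]
    (g : List (α × β)) (p : α × β) (hp : p ∈ g) (hn : (g.map Prod.fst).Nodup) :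
    List.lookup p.1 g = some p.2 := by
  induction g with
  | nil => cases hp
  | cons q t ih =>
    simp only [List.map_cons, List.nodup_cons] at hn
    rcases List.mem_cons.1 hp with h | h
    · subst h; simp [List.lookup]
    · have hne : (p.1 == q.1) = false := by
        apply beq_eq_false_iff_ne.mpr
        intro he
        exact hn.1 (by rw [← he]; exact List.mem_map.2 ⟨p, h, rfl⟩)
      simp only [List.lookup, hne]
      exact ih h hn.2

-- a successful lookup is a member of the list
theorem pv_mem_of_lookup {α β : Type} [BEq α] [LawfulBEq α]
    (cs : List (α × β)) (c : α) (v : β) (h : List.lookup c cs = some v) : (c, v) ∈ cs := by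
  induction cs with
  | nil => simp [List.lookup] at h
  | cons q t ih =>
    by_cases he : c = q.1
    · subst he
      simp [List.lookup] at h
      exact List.mem_cons.2 (Or.inl (by rw [← h]))
    · have : (c == q.1) = false := beq_eq_false_iff_ne.mpr he
      simp only [List.lookup, this] at h
      exact List.mem_cons.2 (Or.inr (ih h))

-- one per-color accumulator step of A equals a max-fold step
theorem pv_step_eq (cs : List (String × String)) (c : String) (acc : Int) :
    (match List.lookup c cs with
     | some v => if pvInt v > acc then pvInt v else acc
     | none => acc)
    = (match (List.lookup c cs).map pvInt with
       | some x => max acc x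
       | none => acc) := by
  cases List.lookup c cs with
  | none => rfl
  | some v =>
    by_cases hc : pvInt v > acc
    · simp only [if_pos hc, Option.map_some, max_eq_right (le_of_lt hc)]
    · simp only [if_neg hc, Option.map_some, max_eq_left (by omega : pvInt v ≤ acc)]

-- a (single-color) conditional-max fold over the pair list equals a fold over the filterMap
theorem pv_fold_eq (c : String) (g : List (String × List (String × String))) (acc : Int) :
    g.foldl (fun a p =>
      match (List.lookup c p.2).map pvInt with
      | some x => max a x
      | none => a) acc
    = (g.filterMap (fun p => (List.lookup c p.2).map pvInt)).foldl max acc := by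
  induction g generalizing acc with
  | nil => rfl
  | cons p t ih =>
    cases h : (List.lookup c p.2).map pvInt with
    | none => simp [h, ih]
    | some x => simp [h, ih]

-- A's triple fold splits into three independent single-color folds
theorem pv_split (g : List (String × List (String × String)))
    (hn : (g.map Prod.fst).Nodup) (r gr b : Int) :
    g.foldl (fun (st : Int × Int × Int) p =>
      let cs := (List.lookup p.1 g).getD []
      (match (List.lookup "red" cs).map pvInt with
       | some x => max st.1 x | none => st.1,
       match (List.lookup "green" cs).map pvInt with
       | some x => max st.2.1 x | none => st.2.1,
       match (List.lookup "blue" cs).map pvInt with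
       | some x => max st.2.2 x | none => st.2.2)) (r, gr, b)
    = (g.foldl (fun a p => match (List.lookup "red" p.2).map pvInt with
        | some x => max a x | none => a) r,
       g.foldl (fun a p => match (List.lookup "green" p.2).map pvInt with
        | some x => max a x | none => a) gr,
       g.foldl (fun a p => match (List.lookup "blue" p.2).map pvInt with
        | some x => max a x | none => a) b) := by
  have key : ∀ (h : List (String × List (String × String))),
      (∀ p ∈ h, List.lookup p.1 g = some p.2) → ∀ (r gr b : Int),
      h.foldl (fun (st : Int × Int × Int) p =>
        let cs := (List.lookup p.1 g).getD []
        (match (List.lookup "red" cs).map pvInt with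
         | some x => max st.1 x | none => st.1,
         match (List.lookup "green" cs).map pvInt with
         | some x => max st.2.1 x | none => st.2.1,
         match (List.lookup "blue" cs).map pvInt with
         | some x => max st.2.2 x | none => st.2.2)) (r, gr, b)
      = (h.foldl (fun a p => match (List.lookup "red" p.2).map pvInt with
          | some x => max a x | none => a) r,
         h.foldl (fun a p => match (List.lookup "green" p.2).map pvInt with
          | some x => max a x | none => a) gr,
         h.foldl (fun a p => match (List.lookup "blue" p.2).map pvInt with
          | some x => max a x | none => a) b) := by
    intro h hmem
    induction h with
    | nil => intro r gr b; rfl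
    | cons q t ih =>
      intro r gr b
      have hq : List.lookup q.1 g = some q.2 := hmem q (List.mem_cons_self ..)
      simp only [List.foldl_cons, hq, Option.getD_some]
      exact ih (fun p hp => hmem p (List.mem_cons_of_mem _ hp)) _ _ _
  exact key g (fun p hp => pv_lookup_self g p hp hn) r gr b

-- the filter function of Source B's flattening loop
def pvFB (q : String × String) : Option (Int × String) :=
  if q.1 = "red" ∨ q.1 = "green" ∨ q.1 = "blue" then some (pvInt q.2, q.1) else none

-- under unique outer keys, draws = sentinels ++ flatMap of each game's own pairs
theorem pv_draws_eq (g : List (String × List (String × String)))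
    (hn : (g.map Prod.fst).Nodup) :
    pvDraws g = [((0 : Int), "red"), (0, "green"), (0, "blue")]
      ++ g.flatMap (fun p => p.2.filterMap pvFB) := by
  unfold pvDraws
  have key : ∀ (h : List (String × List (String × String))),
      (∀ p ∈ h, List.lookup p.1 g = some p.2) →
      h.foldl (fun (acc : List (Int × String)) p =>
        acc ++ ((List.lookup p.1 g).getD []).filterMap (fun q =>
          if q.1 = "red" ∨ q.1 = "green" ∨ q.1 = "blue" then some (pvInt q.2, q.1) else none))
        [((0 : Int), "red"), (0, "green"), (0, "blue")]
      = [((0 : Int), "red"), (0, "green"), (0, "blue")] ++ h.flatMap (fun p => p.2.filterMap pvFB) := by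
    intro h hmem
    have : h.foldl (fun (acc : List (Int × String)) p =>
        acc ++ ((List.lookup p.1 g).getD []).filterMap (fun q =>
          if q.1 = "red" ∨ q.1 = "green" ∨ q.1 = "blue" then some (pvInt q.2, q.1) else none))
        [((0 : Int), "red"), (0, "green"), (0, "blue")]
      = h.foldl (fun (acc : List (Int × String)) p => acc ++ p.2.filterMap pvFB)
        [((0 : Int), "red"), (0, "green"), (0, "blue")] := by
      apply PySem.List.foldl_congr_mem
      intro acc p hp
      rw [hmem p hp]
      rfl
    rw [this]
    exact PySem.List.foldl_append_eq_flatMap _ h _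
  exact key g (fun p hp => pv_lookup_self g p hp hn)

-- the insert-if-absent loop realises first-occurrence lookup
theorem pv_dict_first (c : String) (l : List (Int × String)) (d : PySem.Dict String Int) :
    (l.foldl (fun (d : PySem.Dict String Int) t =>
      if d.contains t.2 then d else d.insert t.2 t.1) d).get? c
    = match d.get? c with
      | some v => some v
      | none => (l.find? (fun t => t.2 == c)).map (·.1) := by
  induction l generalizing d with
  | nil => cases hd : d.get? c <;> simp [hd]
  | cons t rest ih =>
    simp only [List.foldl_cons]
    by_cases hc : d.contains t.2
    · rw [if_pos hc, ih]
      cases hd : d.get? c with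
      | some v => rfl
      | none =>
        have hne : (t.2 == c) = false := by
          rw [beq_eq_false_iff_ne]
          intro he
          rw [PySem.Dict.contains_eq_isSome_get?, he, hd] at hc
          simp at hc
        simp only [List.find?_cons, hne]
    · rw [if_neg hc, ih]
      by_cases he : t.2 = c
      · subst he
        have hd : d.get? t.2 = none := by
          rw [PySem.Dict.contains_eq_isSome_get?] at hc
          cases h : d.get? t.2 with
          | none => rfl
          | some v => rw [h] at hc; simp at hc
        rw [hd, PySem.Dict.get?_insert_self, List.find?_cons_of_pos (by simp)]
        rfl
      · have hne : (t.2 == c) = false := beq_eq_false_iff_ne.mpr he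
        rw [PySem.Dict.get?_insert_of_ne d t.1 (show c ≠ t.2 from fun hh => he hh.symm)]
        cases hd : d.get? c with
        | some v => rfl
        | none => rw [List.find?_cons_of_neg (by simp [hne])]

-- in a list sorted descending by the first component, the first pair with a given
-- second component bounds every pair with that second component
theorem pv_find_bound (c : String) (l : List (Int × String)) (a : Int × String)
    (hp : l.Pairwise (fun x y => y.1 ≤ x.1))
    (hf : l.find? (fun t => t.2 == c) = some a) :
    ∀ b ∈ l, b.2 = c → b.1 ≤ a.1 := by
  induction l with
  | nil => simp at hf
  | cons t rest ih =>
    rw [List.pairwise_cons] at hp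
    by_cases he : t.2 = c
    · have : (t.2 == c) = true := beq_iff_eq.mpr he
      simp only [List.find?_cons, this] at hf
      cases hf
      intro b hb _
      rcases List.mem_cons.1 hb with h | h
      · exact le_of_eq (by rw [h])
      · exact hp.1 b h
    · have hne : (t.2 == c) = false := beq_eq_false_iff_ne.mpr he
      simp only [List.find?_cons, hne] at hf
      intro b hb hbc
      rcases List.mem_cons.1 hb with h | h
      · exact absurd (h ▸ hbc) he
      · exact ih hp.2 hf b h hbc

-- membership with colour c in the flattened draws = membership in A's per-colour value list
theorem pv_flat_char (g : List (String × List (String × String)))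
    (hi : ∀ p ∈ g, (p.2.map Prod.fst).Nodup)
    (c : String) (hc : c = "red" ∨ c = "green" ∨ c = "blue") (x : Int) :
    (x, c) ∈ g.flatMap (fun p => p.2.filterMap pvFB)
    ↔ x ∈ g.filterMap (fun p => (List.lookup c p.2).map pvInt) := by
  rw [List.mem_flatMap, List.mem_filterMap]
  constructor
  · rintro ⟨p, hp, hm⟩
    rw [List.mem_filterMap] at hm
    obtain ⟨q, hq, hfq⟩ := hm
    unfold pvFB at hfq
    split at hfq
    · cases hfq
      refine ⟨p, hp, ?_⟩
      rw [pv_lookup_self p.2 q hq (hi p hp)]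
      rfl
    · cases hfq
  · rintro ⟨p, hp, hm⟩
    cases hl : List.lookup c p.2 with
    | none => rw [hl] at hm; cases hm
    | some v =>
      rw [hl, Option.map_some, Option.some.injEq] at hm
      refine ⟨p, hp, ?_⟩
      rw [List.mem_filterMap]
      refine ⟨(c, v), pv_mem_of_lookup p.2 c v hl, ?_⟩
      unfold pvFB
      rw [if_pos hc, hm]

-- B's first-hit-after-sort for colour c equals A's max-fold for colour c
theorem pv_color (g : List (String × List (String × String)))
    (hn : (g.map Prod.fst).Nodup) (hi : ∀ p ∈ g, (p.2.map Prod.fst).Nodup)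
    (c : String) (hc : c = "red" ∨ c = "green" ∨ c = "blue") :
    ((PySem.List.sorted (pvDraws g) (fun t => t.1) true).foldl
      (fun (d : PySem.Dict String Int) t =>
        if d.contains t.2 then d else d.insert t.2 t.1) PySem.Dict.empty).getD c 0
    = (g.filterMap (fun p => (List.lookup c p.2).map pvInt)).foldl max 0 := by
  have hdraws := pv_draws_eq g hn
  have hsent : ((0 : Int), c) ∈ pvDraws g := by
    rw [hdraws]
    rcases hc with h | h | h <;> (subst h; simp)
  have hsentS : ((0 : Int), c) ∈ PySem.List.sorted (pvDraws g) (fun t => t.1) true :=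
    (PySem.List.mem_sorted _ _ _ _).2 hsent
  have hfind : ∃ a, (PySem.List.sorted (pvDraws g) (fun t => t.1) true).find?
      (fun t => t.2 == c) = some a := by
    have : ((PySem.List.sorted (pvDraws g) (fun t => t.1) true).find?
        (fun t => t.2 == c)).isSome := by
      rw [List.find?_isSome]
      exact ⟨(0, c), hsentS, by simp⟩
    exact Option.isSome_iff_exists.mp this
  obtain ⟨a, ha⟩ := hfind
  have hpa := List.find?_some ha
  obtain ⟨av, ac⟩ := a
  have hac : ac = c := by simpa using hpa
  subst hac
  have haS : (av, ac) ∈ PySem.List.sorted (pvDraws g) (fun t => t.1) true :=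
    List.mem_of_find?_eq_some ha
  have haD : (av, ac) ∈ pvDraws g := (PySem.List.mem_sorted _ _ _ _).1 haS
  have hbound : ∀ b ∈ pvDraws g, b.2 = ac → b.1 ≤ av := by
    intro b hb hbc
    exact pv_find_bound ac _ (av, ac)
      (PySem.List.sorted_pairwise_rev (pvDraws g) (fun t => t.1)) ha
      b ((PySem.List.mem_sorted _ _ _ _).2 hb) hbc
  have hMub := PySem.List.le_foldl_max
    (g.filterMap (fun p => (List.lookup ac p.2).map pvInt)) 0
  have h1 : av ≤ (g.filterMap (fun p => (List.lookup ac p.2).map pvInt)).foldl max 0 := by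
    rw [hdraws] at haD
    rcases List.mem_append.1 haD with h | h
    · have : av = 0 := by
        simp only [List.mem_cons, List.not_mem_nil, or_false] at h
        rcases h with h | h | h <;> exact congrArg Prod.fst h
      rw [this]; exact hMub.1
    · exact hMub.2 av ((pv_flat_char g hi ac hc av).1 h)
  have h2 : (g.filterMap (fun p => (List.lookup ac p.2).map pvInt)).foldl max 0 ≤ av := by
    rcases PySem.List.foldl_max_mem
        (g.filterMap (fun p => (List.lookup ac p.2).map pvInt)) 0 with h | h
    · rw [h]
      exact hbound (0, ac) hsent rfl
    · have hmem : ((g.filterMap (fun p => (List.lookup ac p.2).map pvInt)).foldl max 0, ac)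
          ∈ g.flatMap (fun p => p.2.filterMap pvFB) :=
        (pv_flat_char g hi ac hc _).2 h
      exact hbound _ (by rw [hdraws]; exact List.mem_append_right _ hmem) rfl
  rw [PySem.Dict.getD_eq_get?_getD, pv_dict_first ac _ PySem.Dict.empty]
  simp only [PySem.Dict.get?_empty, ha, Option.map_some, Option.getD_some]
  exact le_antisymm h1 h2

-- ===== VERDICT (by name: the statement is the Claim_ definition above) =====
theorem min_rgb_power_spec : Claim_equal_min_rgb_power := by
  intro g _ hpre
  unfold Spec_min_rgb_power min_rgb_power min_rgb_power_alt
  have hi : ∀ p ∈ g, (p.2.map Prod.fst).Nodup := fun p hp => (hpre.2 p hp).1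
  have hA : (g.foldl (fun (st : Int × Int × Int) p =>
      let cs := (List.lookup p.1 g).getD []
      let r := match List.lookup "red" cs with
               | some v => if pvInt v > st.1 then pvInt v else st.1
               | none => st.1
      let gr := match List.lookup "green" cs with
               | some v => if pvInt v > st.2.1 then pvInt v else st.2.1
               | none => st.2.1
      let b := match List.lookup "blue" cs with
               | some v => if pvInt v > st.2.2 then pvInt v else st.2.2
               | none => st.2.2
      (r, gr, b)) ((0 : Int), (0 : Int), (0 : Int)))
      = (g.foldl (fun (st : Int × Int × Int) p =>
      let cs := (List.lookup p.1 g).getD []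
      (match (List.lookup "red" cs).map pvInt with
       | some x => max st.1 x | none => st.1,
       match (List.lookup "green" cs).map pvInt with
       | some x => max st.2.1 x | none => st.2.1,
       match (List.lookup "blue" cs).map pvInt with
       | some x => max st.2.2 x | none => st.2.2)) ((0 : Int), (0 : Int), (0 : Int))) := by
    apply PySem.List.foldl_congr_mem
    intro st p _
    simp only [pv_step_eq]
  simp only [hA, pv_split g hpre.1, pv_fold_eq]
  rw [pv_color g hpre.1 hi "red" (Or.inl rfl),
      pv_color g hpre.1 hi "green" (Or.inr (Or.inl rfl)),
      pv_color g hpre.1 hi "blue" (Or.inr (Or.inr rfl))]
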